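-- pv_equiv track=rewrite | github.com/ebmalabuyo/concordance-table | concordance.py | djbx33a
-- ===== SOURCE A (Python) =====
-- def djbx33a(s: str) -> int:
--     """Returns a modified DJBX33A hash of the given string.
--
--     See the project specification for the formula.
--     """
--     n = min(len(s), 8)
--     sum = 0
--     for i in range(n):
--         val = ord(s[i]) * 33**(n - 1 - i)
--         sum += val
--     out = 5381 * (33**n) + sum
--     return out
-- ===== SOURCE B (Python) =====
-- def djbx33a(s: str) -> int:
--     """Returns a modified DJBX33A hash of the given string.
--
--     Horner's method: one running accumulator, no explicit powers.
--     """
--     h = 5381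
--     for c in s[:8]:
--         h = h * 33 + ord(c)
--     return h
-- ===== Notes on version B (the rewrite author's own statement) =====
-- stated objective: simpler
-- what changed: Replaces A's per-index power computation (ord(s[i])*33**(n-1-i) summed, plus a final 5381*33**n term) with Horner's method: a single accumulator h = h*33 + ord(c) over the first 8 characters, never computing an explicit power.
import Mathlib
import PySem

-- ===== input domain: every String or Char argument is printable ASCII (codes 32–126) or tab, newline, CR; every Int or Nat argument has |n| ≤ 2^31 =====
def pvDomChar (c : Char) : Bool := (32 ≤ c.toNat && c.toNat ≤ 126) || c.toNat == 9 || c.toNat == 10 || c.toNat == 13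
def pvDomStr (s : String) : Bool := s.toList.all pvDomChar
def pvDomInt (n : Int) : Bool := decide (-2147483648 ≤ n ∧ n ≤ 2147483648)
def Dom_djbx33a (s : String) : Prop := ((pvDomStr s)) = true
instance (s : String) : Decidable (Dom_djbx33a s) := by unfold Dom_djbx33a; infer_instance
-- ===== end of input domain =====

-- B replaces A's explicit per-index powers 33**(n-1-i) (+ final 5381*33**n term) with
-- Horner's method over the first 8 characters; objective: simpler.


-- ===== PORT A =====
-- literal port: n = min(len(s), 8); sum over i in range(n) of ord(s[i]) * 33**(n-1-i); 5381*33**n + sum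
def djbx33a (s : String) : Int :=
  let n : Int := min (PySem.Str.len s) 8
  let sum : Int := (PySem.List.pyRange 0 n 1).foldl
    (fun acc i => acc + (((PySem.Str.pyGet? s i).getD ' ').toNat : Int) * 33 ^ (n - 1 - i).toNat) 0
  5381 * 33 ^ n.toNat + sum

-- ===== PORT B =====
-- literal port of Source B: h = 5381; for c in s[:8]: h = h*33 + ord(c)
def djbx33a_alt (s : String) : Int :=
  (PySem.Str.slice s none (some 8)).toList.foldl (fun h c => h * 33 + (c.toNat : Int)) 5381

-- ===== PRECONDITION & SPEC =====
def Spec_djbx33a (s : String) (out : Int) : Prop := out = djbx33a_alt s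
instance (s : String) (out : Int) : Decidable (Spec_djbx33a s out) := by unfold Spec_djbx33a; infer_instance

-- ===== CLAIM (what is proved, stated in full; the proofs are below) =====
def Claim_equal_djbx33a : Prop := ∀ (s : String), Dom_djbx33a s → Spec_djbx33a s (djbx33a s)

-- ===== LEMMAS AND PROOFS =====

-- Horner fold with an arbitrary seed splits off the seed as a power of 33.
theorem horner_seed (t : List Char) (h : Int) :
    t.foldl (fun a c => a * 33 + (c.toNat : Int)) h
      = h * 33 ^ t.length + t.foldl (fun a c => a * 33 + (c.toNat : Int)) 0 := by
  induction t generalizing h with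
  | nil => simp
  | cons c cs ih =>
    simp only [List.foldl_cons, List.length_cons]
    rw [ih (h * 33 + (c.toNat : Int)), ih ((0 : Int) * 33 + (c.toNat : Int))]
    ring

-- A's indexed power-sum over range(len v) equals the Horner fold (seed 0), up to a 33^e factor.
theorem sum_pow (v : List Char) (a : Int) (e : Nat) :
    (List.range v.length).foldl
        (fun acc k => acc + (((v[k]?).getD ' ').toNat : Int) * 33 ^ (v.length - 1 - k + e)) a
      = a + (v.foldl (fun h c => h * 33 + (c.toNat : Int)) 0) * 33 ^ e := by
  induction v using List.reverseRecOn generalizing a e with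
  | nil => simp
  | append_singleton w c ih =>
    rw [List.length_append, List.length_singleton, List.range_succ, List.foldl_append,
        List.foldl_append]
    have hcongr : (List.range w.length).foldl
        (fun acc k => acc + ((((w ++ [c])[k]?).getD ' ').toNat : Int)
            * 33 ^ (w.length + 1 - 1 - k + e)) a
      = (List.range w.length).foldl
        (fun acc k => acc + (((w[k]?).getD ' ').toNat : Int)
            * 33 ^ (w.length - 1 - k + (e + 1))) a := by
      apply PySem.List.foldl_congr_mem _ _ _ _
      intro acc k hk
      have hk' : k < w.length := List.mem_range.mp hk
      rw [List.getElem?_append_left hk']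
      congr 2
      congr 1
      omega
    rw [hcongr, ih a (e + 1)]
    have hc : (w ++ [c])[w.length]? = some c := by
      rw [List.getElem?_append_right (le_refl w.length)]
      simp
    simp only [List.foldl_cons, List.foldl_nil, hc, Option.getD_some]
    have he : w.length + 1 - 1 - w.length + e = e := by omega
    rw [he]
    ring

-- the list-level form of the whole equivalence (n = min(len l, 8))
theorem main_list (l : List Char) :
    5381 * 33 ^ (min l.length 8)
      + (List.range (min l.length 8)).foldl
          (fun acc (k : Nat) => acc + (((l[k]?).getD ' ').toNat : Int)
              * 33 ^ (((min l.length 8 : Nat) : Int) - 1 - (k : Int)).toNat) 0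
      = (l.take 8).foldl (fun h c => h * 33 + (c.toNat : Int)) 5381 := by
  have htlen : (l.take 8).length = min l.length 8 := by
    simp [Nat.min_comm]
  have step1 : (List.range (min l.length 8)).foldl
        (fun acc (k : Nat) => acc + (((l[k]?).getD ' ').toNat : Int)
            * 33 ^ (((min l.length 8 : Nat) : Int) - 1 - (k : Int)).toNat) 0
      = (List.range (min l.length 8)).foldl
        (fun acc (k : Nat) => acc + ((((l.take 8)[k]?).getD ' ').toNat : Int)
            * 33 ^ ((l.take 8).length - 1 - k + 0)) 0 := by
    apply PySem.List.foldl_congr_mem _ _ _ _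
    intro acc k hk
    have hk' : k < min l.length 8 := List.mem_range.mp hk
    rw [List.getElem?_take_of_lt (show k < 8 by omega)]
    congr 2
    congr 1
    rw [htlen]
    omega
  have hr : List.range (min l.length 8) = List.range (l.take 8).length := by rw [htlen]
  rw [step1, hr, sum_pow (l.take 8) 0 0, horner_seed (l.take 8) 5381, htlen]
  ring

theorem djbx33a_eq (s : String) : djbx33a s = djbx33a_alt s := by
  unfold djbx33a djbx33a_alt
  have hslice : (PySem.Str.slice s none (some 8)).toList = s.toList.take 8 := by
    simp only [PySem.Str.toList_slice, PySem.Chars.slice]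
    simp [PySem.List.slice, PySem.List.clampIdx]
  rw [hslice]
  have hmin : min (PySem.Str.len s) 8 = ((min s.toList.length 8 : Nat) : Int) := by
    rw [PySem.Str.len_eq]
    push_cast
    rfl
  rw [hmin]
  simp only [PySem.List.pyRange_zero_natCast, List.foldl_map, PySem.Str.pyGet?_natCast,
    Int.toNat_natCast]
  exact main_list s.toList

-- ===== VERDICT (by name: the statement is the Claim_ definition above) =====
theorem djbx33a_spec : Claim_equal_djbx33a := by
  intro s _
  unfold Spec_djbx33a
  exact djbx33a_eq s
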